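-- pv_equiv track=rewrite | github.com/withaarzoo/GeeksforGeeks-Solution | src/Maximum People Visible in a Line/Code/soluition.py | maxPeople
-- ===== SOURCE A (Python) =====
-- def maxPeople(arr):
--     n = len(arr)
--     if n == 0:
--         return 0
--
--     next_ge = [n] * n   # default n => no greater/equal to right
--     prev_ge = [-1] * n  # default -1 => no greater/equal to left
--     st = []
--
--     # next_ge: nearest index to right with height >= arr[i]
--     for i in range(n):
--         while st and arr[i] >= arr[st[-1]]:
--             idx = st.pop()
--             next_ge[idx] = i
--         st.append(i)
--
--     # clear stack to reuse
--     st.clear()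
--
--     # prev_ge: nearest index to left with height >= arr[i]
--     for i in range(n):
--         while st and arr[st[-1]] < arr[i]:
--             st.pop()
--         if st:
--             prev_ge[i] = st[-1]
--         st.append(i)
--
--     ans = 0
--     for i in range(n):
--         left_count = i - prev_ge[i] - 1
--         right_count = next_ge[i] - i - 1
--         total = left_count + right_count + 1  # include self
--         if total > ans:
--             ans = total
--     return ans
-- ===== SOURCE B (Python) =====
-- def maxPeople(arr):
--     # Direct nearest->= scans per person instead of the two monotonic-stack passes.
--     best = 0
--     for i, v in enumerate(arr):
--         right = 0
--         for x in arr[i + 1:]: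
--             if x >= v:
--                 break
--             right += 1
--         left = 0
--         for x in reversed(arr[:i]):
--             if x >= v:
--                 break
--             left += 1
--         span = left + right + 1
--         if span > best:
--             best = span
--     return best
-- ===== Notes on version B (the rewrite author's own statement) =====
-- stated objective: simpler
-- what changed: Replaces the two monotonic-stack passes and the auxiliary next_ge/prev_ge arrays with direct per-element scans for the nearest >= neighbour on each side, folded into one loop.
import Mathlib
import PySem

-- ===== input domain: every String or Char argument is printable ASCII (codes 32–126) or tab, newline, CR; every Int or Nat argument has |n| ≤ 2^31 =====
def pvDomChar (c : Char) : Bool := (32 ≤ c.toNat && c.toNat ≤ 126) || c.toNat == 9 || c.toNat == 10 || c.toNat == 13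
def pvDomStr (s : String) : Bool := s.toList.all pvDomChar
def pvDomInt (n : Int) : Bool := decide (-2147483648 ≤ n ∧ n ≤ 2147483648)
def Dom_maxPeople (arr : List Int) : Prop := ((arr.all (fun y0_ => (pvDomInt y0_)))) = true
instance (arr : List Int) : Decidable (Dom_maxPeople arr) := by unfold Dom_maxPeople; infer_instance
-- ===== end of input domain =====

-- B replaces A's two monotonic-stack passes with direct per-element nearest->=-neighbour scans (simpler single loop, no auxiliary arrays); equal return value on every input.


-- ===== PORT A =====
-- inner `while st and arr[i] >= arr[st[-1]]` of pass 1: pop tops, recording next_ge[popped] = i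
def pass1Pop (arr : List Int) (i : Nat) : List Nat → List Int → (List Int × List Nat)
  | [], ng => (ng, [])
  | t :: rest, ng =>
    if arr.getD t 0 ≤ arr.getD i 0 then pass1Pop arr i rest (ng.set t (i : Int))
    else (ng, t :: rest)

-- first loop of A: builds next_ge (stack kept with top at head)
def pass1 (arr : List Int) (n : Nat) : List Int :=
  ((List.range n).foldl (fun (p : List Int × List Nat) i =>
    let q := pass1Pop arr i p.2 p.1
    (q.1, i :: q.2)) (List.replicate n (n : Int), [])).1

-- inner `while st and arr[st[-1]] < arr[i]` of pass 2: drop tops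
def pass2Drop (arr : List Int) (i : Nat) : List Nat → List Nat
  | [] => []
  | t :: rest => if arr.getD t 0 < arr.getD i 0 then pass2Drop arr i rest else t :: rest

-- second loop of A: builds prev_ge
def pass2 (arr : List Int) (n : Nat) : List Int :=
  ((List.range n).foldl (fun (p : List Int × List Nat) i =>
    let st' := pass2Drop arr i p.2
    let pg' := match st' with
      | [] => p.1
      | t :: _ => p.1.set i (t : Int)
    (pg', i :: st')) (List.replicate n (-1 : Int), [])).1

def maxPeople (arr : List Int) : Int :=
  let n := arr.length
  if n = 0 then 0
  else
    let next_ge := pass1 arr n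
    let prev_ge := pass2 arr n
    (List.range n).foldl (fun (ans : Int) (i : Nat) =>
      let left_count := (i : Int) - prev_ge.getD i 0 - 1
      let right_count := next_ge.getD i 0 - (i : Int) - 1
      let total := left_count + right_count + 1
      if total > ans then total else ans) 0

-- ===== PORT B =====
-- `for x in seq: if x >= v: break; cnt += 1` — number of leading elements < v
def cntLt (v : Int) : List Int → Nat
  | [] => 0
  | x :: xs => if x < v then cntLt v xs + 1 else 0

def maxPeople_alt (arr : List Int) : Int :=
  (List.range arr.length).foldl (fun (best : Int) (i : Nat) =>
    let v := arr.getD i 0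
    let right := cntLt v (arr.drop (i + 1))
    let left := cntLt v ((arr.take i).reverse)
    let span : Int := (left : Int) + (right : Int) + 1
    if span > best then span else best) 0

-- ===== PRECONDITION & SPEC =====
def Spec_maxPeople (arr : List Int) (out : Int) : Prop := out = maxPeople_alt arr
instance (arr : List Int) (out : Int) : Decidable (Spec_maxPeople arr out) := by unfold Spec_maxPeople; infer_instance

-- ===== CLAIM (what is proved, stated in full; the proofs are below) =====
def Claim_equal_maxPeople : Prop := ∀ (arr : List Int), Dom_maxPeople arr → Spec_maxPeople arr (maxPeople arr)

-- ===== LEMMAS AND PROOFS =====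

lemma pass1Pop_eq (arr : List Int) (i : Nat) :
    ∀ (st : List Nat) (ng : List Int), pass1Pop arr i st ng =
      ((st.takeWhile (fun t => decide (arr.getD t 0 ≤ arr.getD i 0))).foldl
          (fun g t => g.set t (i : Int)) ng,
       st.dropWhile (fun t => decide (arr.getD t 0 ≤ arr.getD i 0))) := by
  intro st
  induction st with
  | nil => intro ng; simp [pass1Pop]
  | cons t rest ih =>
    intro ng
    rw [pass1Pop]
    by_cases h : arr.getD t 0 ≤ arr.getD i 0
    · rw [if_pos h, ih, List.takeWhile_cons, List.dropWhile_cons]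
      simp only [List.getD_eq_getElem?_getD] at h
      simp [h]
    · rw [if_neg h, List.takeWhile_cons, List.dropWhile_cons]
      simp only [List.getD_eq_getElem?_getD] at h
      simp [h]

lemma pass2Drop_eq (arr : List Int) (i : Nat) (st : List Nat) :
    pass2Drop arr i st = st.dropWhile (fun t => decide (arr.getD t 0 < arr.getD i 0)) := by
  induction st with
  | nil => simp [pass2Drop]
  | cons t rest ih =>
    rw [pass2Drop]
    by_cases h : arr.getD t 0 < arr.getD i 0
    · rw [if_pos h, ih, List.dropWhile_cons]
      simp only [List.getD_eq_getElem?_getD] at h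
      simp [h]
    · rw [if_neg h, List.dropWhile_cons]
      simp only [List.getD_eq_getElem?_getD] at h
      simp [h]

lemma getD_foldl_set (v : Int) :
    ∀ (P : List Nat) (ng : List Int) (i : Nat),
      ((P.foldl (fun g t => g.set t v) ng).getD i 0
        = if i ∈ P ∧ i < ng.length then v else ng.getD i 0)
      ∧ (P.foldl (fun g t => g.set t v) ng).length = ng.length := by
  intro P
  induction P with
  | nil => intro ng i; simp
  | cons t rest ih =>
    intro ng i
    obtain ⟨h1, h2⟩ := ih (ng.set t v) i
    have hnone : ¬ i < ng.length → ng[i]? = none := fun hl => List.getElem?_eq_none (Nat.le_of_not_lt hl)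
    have hnone' : ¬ i < ng.length → (ng.set t v)[i]? = none := fun hl =>
      List.getElem?_eq_none (by rw [List.length_set]; exact Nat.le_of_not_lt hl)
    refine ⟨?_, by simp only [List.foldl_cons, h2, List.length_set]⟩
    simp only [List.foldl_cons, h1, List.length_set, List.mem_cons]
    by_cases hl : i < ng.length
    · by_cases hm : i ∈ rest
      · simp [hm, hl]
      · by_cases ht : t = i
        · simp [hm, hl, ht, List.getD_eq_getElem?_getD, List.getElem?_set_self (ht ▸ hl)]
        · simp [hm, hl, ht, List.getD_eq_getElem?_getD, List.getElem?_set_ne ht]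
          exact fun h => absurd h.symm ht
    · simp [hl, List.getD_eq_getElem?_getD, hnone hl, hnone' hl]

lemma dropWhile_rev_filter (p g : Nat → Bool) :
    ∀ m, (∀ t' t, t' < t → t < m → g t' = true → g t = true → p t = false → p t' = false) →
    (((List.range m).filter g).reverse.dropWhile p)
        = ((List.range m).filter (fun t => g t && !p t)).reverse := by
  intro m
  induction m with
  | zero => intro _; simp
  | succ m ih =>
    intro hm
    have ih' := ih (fun t' t h1 h2 h3 h4 h5 => hm t' t h1 (by omega) h3 h4 h5)
    rw [List.range_succ, List.filter_append, List.filter_append, List.reverse_append,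
        List.reverse_append]
    by_cases hg : g m = true
    · by_cases hp : p m = true
      · simp [List.filter_cons, hg, hp, List.dropWhile_cons, ih']
      · have hall : ∀ t ∈ List.range m, (fun t => g t && !p t) t = g t := by
          intro t htm
          by_cases hgt : g t = true
          · simp [hgt, hm t m (List.mem_range.mp htm) (Nat.lt_succ_self m) hgt hg (Bool.eq_false_iff.mpr hp)]
          · simp [Bool.eq_false_iff.mpr hgt]
        rw [List.filter_congr hall]
        simp [List.filter_cons, hg, hp, List.dropWhile_cons]
    · simp only [List.filter_cons]
      simp [Bool.eq_false_iff.mpr hg, ih']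

lemma takeWhile_rev_filter (p g : Nat → Bool) :
    ∀ m, (∀ t' t, t' < t → t < m → g t' = true → g t = true → p t = false → p t' = false) →
    (((List.range m).filter g).reverse.takeWhile p)
        = ((List.range m).filter (fun t => g t && p t)).reverse := by
  intro m
  induction m with
  | zero => intro _; simp
  | succ m ih =>
    intro hm
    have ih' := ih (fun t' t h1 h2 h3 h4 h5 => hm t' t h1 (by omega) h3 h4 h5)
    rw [List.range_succ, List.filter_append, List.filter_append, List.reverse_append,
        List.reverse_append]
    by_cases hg : g m = true
    · by_cases hp : p m = true
      · simp [List.filter_cons, hg, hp, List.takeWhile_cons, ih']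
      · have hall : ∀ t ∈ List.range m, (fun t => g t && p t) t = (fun _ => false) t := by
          intro t htm
          by_cases hgt : g t = true
          · simp [hgt, hm t m (List.mem_range.mp htm) (Nat.lt_succ_self m) hgt hg (Bool.eq_false_iff.mpr hp)]
          · simp [Bool.eq_false_iff.mpr hgt]
        rw [List.filter_congr hall]
        simp [List.filter_cons, hg, hp, List.takeWhile_cons]
    · simp only [List.filter_cons]
      simp [Bool.eq_false_iff.mpr hg, ih']

def nxtVal (arr : List Int) (i : Nat) : Int :=
  (i : Int) + 1 + (cntLt (arr.getD i 0) (arr.drop (i + 1)) : Int)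

def prvVal (arr : List Int) (i : Nat) : Int :=
  (i : Int) - 1 - (cntLt (arr.getD i 0) ((arr.take i).reverse) : Int)

def g1 (arr : List Int) (k t : Nat) : Bool :=
  decide (∀ j, j < k → t < j → arr.getD j 0 < arr.getD t 0)

def g2 (arr : List Int) (k t : Nat) : Bool :=
  decide (∀ j, j < k → t < j → arr.getD j 0 ≤ arr.getD t 0)

lemma cntLt_unique (v : Int) (l : List Int) (c : Nat)
    (h1 : ∀ m, m < c → l.getD m 0 < v)
    (h2 : c < l.length → ¬ l.getD c 0 < v)
    (hc : c ≤ l.length) : cntLt v l = c := by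
  induction l generalizing c with
  | nil =>
    simp at hc
    simp [cntLt, hc]
  | cons x xs ih =>
    cases c with
    | zero =>
      have := h2 (by simp)
      simp only [List.getD_cons_zero] at this
      simp [cntLt, this]
    | succ c =>
      have hx : x < v := by simpa using h1 0 (Nat.succ_pos c)
      have : cntLt v xs = c := by
        refine ih c (fun m hm => by simpa using h1 (m+1) (by omega)) ?_ (by simpa using hc)
        intro hcl
        simpa using h2 (by simpa using Nat.succ_lt_succ hcl)
      simp [cntLt, hx, this]

lemma cntLt_lt (v : Int) (l : List Int) : ∀ m, m < cntLt v l → l.getD m 0 < v := by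
  induction l with
  | nil => simp [cntLt]
  | cons x xs ih =>
    intro m hm
    by_cases hx : x < v
    · cases m with
      | zero => simpa using hx
      | succ m =>
        simp only [cntLt, hx, if_true] at hm
        simpa using ih m (by omega)
    · simp [cntLt, hx] at hm

lemma cntLt_le_len (v : Int) (l : List Int) : cntLt v l ≤ l.length := by
  induction l with
  | nil => simp [cntLt]
  | cons x xs ih =>
    by_cases hx : x < v <;> simp [cntLt, hx] <;> omega

lemma cntLt_stop (v : Int) (l : List Int) :
    cntLt v l < l.length → ¬ l.getD (cntLt v l) 0 < v := by
  induction l with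
  | nil => simp [cntLt]
  | cons x xs ih =>
    by_cases hx : x < v
    · intro h
      simp only [cntLt, hx, if_true] at h ⊢
      simpa using ih (by simpa using h)
    · intro _
      simpa [cntLt, hx] using hx

lemma getD_drop (arr : List Int) (a m : Nat) :
    (arr.drop a).getD m 0 = arr.getD (a + m) 0 := by
  simp [List.getD_eq_getElem?_getD, List.getElem?_drop]

lemma getD_rev_take (arr : List Int) (k m : Nat) (hk : k ≤ arr.length) (hm : m < k) :
    ((arr.take k).reverse).getD m 0 = arr.getD (k - 1 - m) 0 := by
  have hlt : (arr.take k).length = k := by simp [List.length_take]; omega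
  have hm' : m < (arr.take k).reverse.length := by simp [hlt]; omega
  rw [List.getD_eq_getElem _ _ hm', List.getD_eq_getElem _ _ (by omega : k - 1 - m < arr.length)]
  rw [List.getElem_reverse]
  simp only [hlt, List.getElem_take]

lemma g1_ge (arr : List Int) (k t : Nat) (h : k ≤ t + 1) : g1 arr k t = true := by
  simp only [g1, decide_eq_true_eq]
  intro j hj htj; omega

lemma g2_ge (arr : List Int) (k t : Nat) (h : k ≤ t + 1) : g2 arr k t = true := by
  simp only [g2, decide_eq_true_eq]
  intro j hj htj; omega

lemma g1_succ (arr : List Int) (k t : Nat) (ht : t < k) :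
    g1 arr (k+1) t = (g1 arr k t && decide (arr.getD k 0 < arr.getD t 0)) := by
  rw [g1, g1, ← Bool.decide_and, decide_eq_decide]
  constructor
  · exact fun h => ⟨fun j hj htj => h j (by omega) htj, h k (by omega) ht⟩
  · rintro ⟨h1, h2⟩ j hj htj
    rcases Nat.lt_succ_iff_lt_or_eq.mp hj with hj' | rfl
    · exact h1 j hj' htj
    · exact h2

lemma g2_succ (arr : List Int) (k t : Nat) (ht : t < k) :
    g2 arr (k+1) t = (g2 arr k t && decide (arr.getD k 0 ≤ arr.getD t 0)) := by
  rw [g2, g2, ← Bool.decide_and, decide_eq_decide]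
  constructor
  · exact fun h => ⟨fun j hj htj => h j (by omega) htj, h k (by omega) ht⟩
  · rintro ⟨h1, h2⟩ j hj htj
    rcases Nat.lt_succ_iff_lt_or_eq.mp hj with hj' | rfl
    · exact h1 j hj' htj
    · exact h2

def Inv1 (arr : List Int) (n k : Nat) (p : List Int × List Nat) : Prop :=
  p.1.length = n ∧
  p.2 = ((List.range k).filter (g1 arr k)).reverse ∧
  ∀ i, i < n → p.1.getD i 0 = if g1 arr k i then (n : Int) else nxtVal arr i

lemma step1 (arr : List Int) (k : Nat) (hk : k < arr.length) (p : List Int × List Nat)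
    (h : Inv1 arr arr.length k p) :
    Inv1 arr arr.length (k+1)
      ((pass1Pop arr k p.2 p.1).1, k :: (pass1Pop arr k p.2 p.1).2) := by
  obtain ⟨hlen, hst, hng⟩ := h
  have hmono : ∀ t' t, t' < t → t < k → g1 arr k t' = true → g1 arr k t = true →
      (decide (arr.getD t 0 ≤ arr.getD k 0)) = false →
      (decide (arr.getD t' 0 ≤ arr.getD k 0)) = false := by
    intro t' t hlt htk hg' hg hp
    simp only [decide_eq_false_iff_not, not_le] at hp ⊢
    have := (decide_eq_true_eq.mp hg') t htk hlt
    omega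
  have hgsucc : ∀ t ∈ List.range k,
      (fun t => g1 arr k t && !(decide (arr.getD t 0 ≤ arr.getD k 0))) t
        = g1 arr (k+1) t := by
    intro t htm
    show (g1 arr k t && !decide (arr.getD t 0 ≤ arr.getD k 0)) = g1 arr (k+1) t
    rw [g1_succ arr k t (List.mem_range.mp htm)]
    congr 1
    rw [← decide_not, decide_eq_decide]
    exact not_le
  have hdrop := dropWhile_rev_filter (fun t => decide (arr.getD t 0 ≤ arr.getD k 0))
      (g1 arr k) k hmono
  have htake := takeWhile_rev_filter (fun t => decide (arr.getD t 0 ≤ arr.getD k 0))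
      (g1 arr k) k hmono
  rw [pass1Pop_eq, hst]
  refine ⟨?_, ?_, ?_⟩
  · simp [(getD_foldl_set _ _ _ 0).2, hlen]
  · simp only [hdrop]
    rw [List.filter_congr hgsucc, List.range_succ, List.filter_append, List.reverse_append]
    simp [g1_ge arr (k+1) k (by omega)]
  · intro i hi
    simp only [htake]
    have hmem : (i ∈ ((List.range k).filter
        (fun t => g1 arr k t && decide (arr.getD t 0 ≤ arr.getD k 0))).reverse)
        ↔ (i < k ∧ g1 arr k i = true ∧ arr.getD i 0 ≤ arr.getD k 0) := by
      simp [List.mem_filter, List.mem_range, and_assoc]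
    rw [(getD_foldl_set _ _ _ _).1]
    by_cases hiP : i < k ∧ g1 arr k i = true ∧ arr.getD i 0 ≤ arr.getD k 0
    · rw [if_pos (by rw [hmem]; exact ⟨hiP, by omega⟩)]
      obtain ⟨hik, hgi, hle⟩ := hiP
      have hcnt : cntLt (arr.getD i 0) (arr.drop (i+1)) = k - i - 1 := by
        refine cntLt_unique _ _ _ ?_ ?_ ?_
        · intro m hm
          rw [getD_drop]
          exact (decide_eq_true_eq.mp hgi) (i+1+m) (by omega) (by omega)
        · intro _
          rw [getD_drop]
          have : i + 1 + (k - i - 1) = k := by omega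
          rw [this]
          omega
        · simp [List.length_drop]; omega
      have hg1f : g1 arr (k+1) i = false := by
        rw [Bool.eq_false_iff]
        intro hcontra
        have := (decide_eq_true_eq.mp hcontra) k (by omega) hik
        omega
      rw [hg1f]
      simp only [if_false, Bool.false_eq_true]
      rw [nxtVal, hcnt]
      push_cast
      omega
    · rw [if_neg (by rw [hmem]; intro hc; exact hiP hc.1), hng i hi]
      by_cases hik : i < k
      · by_cases hgi : g1 arr k i = true
        · have hgt : arr.getD k 0 < arr.getD i 0 := by
            by_contra hle
            exact hiP ⟨hik, hgi, by omega⟩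
          have : g1 arr (k+1) i = true := by
            rw [g1_succ arr k i hik, hgi]
            simpa using hgt
          rw [hgi, this]
        · have : g1 arr (k+1) i = false := by
            rw [g1_succ arr k i hik, Bool.eq_false_iff.mpr hgi]
            simp
          rw [Bool.eq_false_iff.mpr hgi, this]
      · rw [g1_ge arr k i (by omega), g1_ge arr (k+1) i (by omega)]

lemma inv1_fold (arr : List Int) : ∀ k, k ≤ arr.length →
    Inv1 arr arr.length k ((List.range k).foldl (fun (p : List Int × List Nat) i =>
      let q := pass1Pop arr i p.2 p.1
      (q.1, i :: q.2)) (List.replicate arr.length ((arr.length : Nat) : Int), [])) := by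
  intro k
  induction k with
  | zero =>
    intro _
    refine ⟨by simp, by simp, ?_⟩
    intro i hi
    simp only [List.range_zero, List.foldl_nil]
    rw [g1_ge arr 0 i (by omega), List.getD_replicate _ hi]
    simp
  | succ k ih =>
    intro hk
    rw [List.range_succ, List.foldl_append, List.foldl_cons, List.foldl_nil]
    exact step1 arr k (by omega) _ (ih (by omega))

lemma pass1_getD (arr : List Int) (i : Nat) (hi : i < arr.length) :
    (pass1 arr arr.length).getD i 0 = nxtVal arr i := by
  obtain ⟨hlen, hst, hng⟩ := inv1_fold arr arr.length (le_refl _)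
  rw [pass1, hng i hi]
  by_cases hg : g1 arr arr.length i = true
  · rw [hg]
    simp only [if_true]
    have hcnt : cntLt (arr.getD i 0) (arr.drop (i+1)) = arr.length - i - 1 := by
      refine cntLt_unique _ _ _ ?_ ?_ ?_
      · intro m hm
        rw [getD_drop]
        exact (decide_eq_true_eq.mp hg) (i+1+m) (by omega) (by omega)
      · intro hc
        simp only [List.length_drop] at hc
        omega
      · simp only [List.length_drop]
        omega
    rw [nxtVal, hcnt]
    push_cast
    omega
  · rw [Bool.eq_false_iff.mpr hg]
    simp

def Inv2 (arr : List Int) (n k : Nat) (p : List Int × List Nat) : Prop :=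
  p.1.length = n ∧
  p.2 = ((List.range k).filter (g2 arr k)).reverse ∧
  ∀ i, i < n → p.1.getD i 0 = if i < k then prvVal arr i else -1

lemma revtake_len (arr : List Int) (k : Nat) (hk : k ≤ arr.length) :
    ((arr.take k).reverse).length = k := by
  simp [List.length_take]; omega

lemma g2_succ_top (arr : List Int) (k t : Nat) (ht : t < k)
    (hg : g2 arr (k+1) t = true) : arr.getD k 0 ≤ arr.getD t 0 :=
  (decide_eq_true_eq.mp hg) k (by omega) ht

-- if the count stops before exhausting take-k, the stop position has value ≥ arr[k] and is on the stack

lemma cnt_stop_good (arr : List Int) (k : Nat) (hk : k < arr.length)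
    (hc : cntLt (arr.getD k 0) ((arr.take k).reverse) < k) :
    arr.getD k 0 ≤ arr.getD (k - 1 - cntLt (arr.getD k 0) ((arr.take k).reverse)) 0 ∧
    g2 arr (k+1) (k - 1 - cntLt (arr.getD k 0) ((arr.take k).reverse)) = true := by
  set c := cntLt (arr.getD k 0) ((arr.take k).reverse) with hcdef
  have hlen := revtake_len arr k (by omega)
  have hstop := cntLt_stop (arr.getD k 0) ((arr.take k).reverse) (by omega)
  rw [getD_rev_take arr k c (by omega) hc] at hstop
  have hT : arr.getD k 0 ≤ arr.getD (k - 1 - c) 0 := by omega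
  refine ⟨hT, ?_⟩
  rw [g2, decide_eq_true_eq]
  intro j hj hTj
  rcases Nat.lt_succ_iff_lt_or_eq.mp hj with hj' | rfl
  · have hm : k - 1 - j < c := by omega
    have := cntLt_lt (arr.getD k 0) ((arr.take k).reverse) (k - 1 - j) hm
    rw [getD_rev_take arr k (k - 1 - j) (by omega) (by omega)] at this
    have : arr.getD j 0 < arr.getD k 0 := by
      have heq : k - 1 - (k - 1 - j) = j := by omega
      rwa [heq] at this
    omega
  · exact hT

lemma cnt_full_of_empty (arr : List Int) (k : Nat) (hk : k < arr.length)
    (hF : (List.range k).filter (g2 arr (k+1)) = []) :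
    cntLt (arr.getD k 0) ((arr.take k).reverse) = k := by
  have hlen := revtake_len arr k (by omega)
  have hle : cntLt (arr.getD k 0) ((arr.take k).reverse) ≤ k := by
    have := cntLt_le_len (arr.getD k 0) ((arr.take k).reverse)
    omega
  by_contra hne
  have hc : cntLt (arr.getD k 0) ((arr.take k).reverse) < k := by omega
  obtain ⟨_, hgT⟩ := cnt_stop_good arr k hk hc
  have : (k - 1 - cntLt (arr.getD k 0) ((arr.take k).reverse)) ∈
      (List.range k).filter (g2 arr (k+1)) := by
    rw [List.mem_filter, List.mem_range]
    exact ⟨by omega, hgT⟩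
  rw [hF] at this
  simp at this

lemma head_is_T (arr : List Int) (k t0 : Nat) (r : List Nat) (hk : k < arr.length)
    (hFl : ((List.range k).filter (g2 arr (k+1))).reverse = t0 :: r) :
    (t0 : Int) = prvVal arr k := by
  have hF : (List.range k).filter (g2 arr (k+1)) = r.reverse ++ [t0] := by
    have := congrArg List.reverse hFl
    simpa using this
  have ht0 : t0 ∈ (List.range k).filter (g2 arr (k+1)) := by
    rw [hF]; simp
  rw [List.mem_filter, List.mem_range] at ht0
  obtain ⟨ht0k, hgt0⟩ := ht0
  have ht0ge := g2_succ_top arr k t0 ht0k hgt0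
  have hlen := revtake_len arr k (by omega)
  set c := cntLt (arr.getD k 0) ((arr.take k).reverse) with hcdef
  have hle : c ≤ k := by
    have := cntLt_le_len (arr.getD k 0) ((arr.take k).reverse); omega
  have hc : c < k := by
    by_contra hge
    have hck : c = k := by omega
    have := cntLt_lt (arr.getD k 0) ((arr.take k).reverse) (k - 1 - t0) (by omega)
    rw [getD_rev_take arr k (k - 1 - t0) (by omega) (by omega)] at this
    have heq : k - 1 - (k - 1 - t0) = t0 := by omega
    rw [heq] at this
    omega
  obtain ⟨hTge, hgT⟩ := cnt_stop_good arr k hk hc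
  have hTmem : (k - 1 - c) ∈ (List.range k).filter (g2 arr (k+1)) := by
    rw [List.mem_filter, List.mem_range]
    exact ⟨by omega, hgT⟩
  have hpair : ((List.range k).filter (g2 arr (k+1))).Pairwise (· < ·) :=
    List.Pairwise.sublist List.filter_sublist List.pairwise_lt_range
  have ht0le : t0 ≤ k - 1 - c := by
    by_contra hgt
    have hm : k - 1 - t0 < c := by omega
    have := cntLt_lt (arr.getD k 0) ((arr.take k).reverse) (k - 1 - t0) hm
    rw [getD_rev_take arr k (k - 1 - t0) (by omega) (by omega)] at this
    have heq : k - 1 - (k - 1 - t0) = t0 := by omega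
    rw [heq] at this
    omega
  have hTle : k - 1 - c ≤ t0 := by
    rw [hF] at hTmem hpair
    rcases List.mem_append.mp hTmem with hin | hin
    · rcases List.pairwise_append.mp hpair with ⟨_, _, hcross⟩
      exact le_of_lt (hcross _ hin t0 (by simp))
    · simp at hin; omega
  have : t0 = k - 1 - c := by omega
  rw [prvVal, ← hcdef, this]
  push_cast
  omega

lemma step2 (arr : List Int) (k : Nat) (hk : k < arr.length) (p : List Int × List Nat)
    (h : Inv2 arr arr.length k p) :
    Inv2 arr arr.length (k+1)
      ((match pass2Drop arr k p.2 with
        | [] => p.1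
        | t :: _ => p.1.set k (t : Int)),
       k :: pass2Drop arr k p.2) := by
  obtain ⟨hlen, hst, hng⟩ := h
  have hmono : ∀ t' t, t' < t → t < k → g2 arr k t' = true → g2 arr k t = true →
      (decide (arr.getD t 0 < arr.getD k 0)) = false →
      (decide (arr.getD t' 0 < arr.getD k 0)) = false := by
    intro t' t hlt htk hg' hg hp
    simp only [decide_eq_false_iff_not, not_lt] at hp ⊢
    have := (decide_eq_true_eq.mp hg') t htk hlt
    omega
  have hgsucc : ∀ t ∈ List.range k,
      (fun t => g2 arr k t && !(decide (arr.getD t 0 < arr.getD k 0))) t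
        = g2 arr (k+1) t := by
    intro t htm
    show (g2 arr k t && !decide (arr.getD t 0 < arr.getD k 0)) = g2 arr (k+1) t
    rw [g2_succ arr k t (List.mem_range.mp htm)]
    congr 1
    rw [← decide_not, decide_eq_decide]
    exact not_lt
  have hF : pass2Drop arr k p.2 = ((List.range k).filter (g2 arr (k+1))).reverse := by
    rw [pass2Drop_eq, hst,
      dropWhile_rev_filter (fun t => decide (arr.getD t 0 < arr.getD k 0)) (g2 arr k) k hmono,
      List.filter_congr hgsucc]
  refine ⟨?_, ?_, ?_⟩
  · rw [hF]
    rcases ((List.range k).filter (g2 arr (k+1))).reverse with _ | ⟨t0, r⟩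
    · simpa using hlen
    · simpa using hlen
  · rw [hF, List.range_succ, List.filter_append, List.reverse_append]
    simp [g2_ge arr (k+1) k (by omega)]
  · intro i hi
    rw [hF]
    rcases hFl : ((List.range k).filter (g2 arr (k+1))).reverse with _ | ⟨t0, r⟩
    · have hcfull := cnt_full_of_empty arr k hk (by simpa using hFl)
      simp only []
      rw [hng i hi]
      by_cases hik : i < k
      · rw [if_pos hik, if_pos (by omega)]
      · rw [if_neg hik]
        by_cases hik1 : i < k + 1
        · have : i = k := by omega
          subst this
          rw [if_pos hik1, prvVal, hcfull]
          push_cast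
          omega
        · rw [if_neg hik1]
    · simp only []
      have hset := (getD_foldl_set (t0 : Int) [k] p.1 i).1
      simp only [List.foldl_cons, List.foldl_nil, List.mem_singleton] at hset
      rw [hset]
      by_cases hik : i = k
      · subst hik
        rw [if_pos ⟨rfl, by omega⟩, if_pos (by omega)]
        exact head_is_T arr i t0 r hk hFl
      · rw [if_neg (by intro hc; exact hik hc.1), hng i hi]
        by_cases hik' : i < k
        · rw [if_pos hik', if_pos (by omega)]
        · rw [if_neg hik', if_neg (by omega)]

lemma inv2_fold (arr : List Int) : ∀ k, k ≤ arr.length →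
    Inv2 arr arr.length k ((List.range k).foldl (fun (p : List Int × List Nat) i =>
      let st' := pass2Drop arr i p.2
      let pg' := match st' with
        | [] => p.1
        | t :: _ => p.1.set i (t : Int)
      (pg', i :: st')) (List.replicate arr.length (-1 : Int), [])) := by
  intro k
  induction k with
  | zero =>
    intro _
    refine ⟨by simp, by simp, ?_⟩
    intro i hi
    simp only [List.range_zero, List.foldl_nil]
    rw [List.getD_replicate _ hi]
    simp
  | succ k ih =>
    intro hk
    rw [List.range_succ, List.foldl_append, List.foldl_cons, List.foldl_nil]
    exact step2 arr k (by omega) _ (ih (by omega))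

lemma pass2_getD (arr : List Int) (i : Nat) (hi : i < arr.length) :
    (pass2 arr arr.length).getD i 0 = prvVal arr i := by
  obtain ⟨hlen, hst, hng⟩ := inv2_fold arr arr.length (le_refl _)
  rw [pass2, hng i hi, if_pos hi]

-- ===== VERDICT (by name: the statement is the Claim_ definition above) =====
theorem maxPeople_spec : Claim_equal_maxPeople := by
  intro arr _
  unfold Spec_maxPeople maxPeople maxPeople_alt
  by_cases h0 : arr.length = 0
  · simp [h0]
  · simp only [h0]
    refine List.foldl_ext _ _ 0 ?_
    intro ans i hi
    have hi' : i < arr.length := List.mem_range.mp hi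
    rw [pass1_getD arr i hi', pass2_getD arr i hi']
    simp only [nxtVal, prvVal]
    ring_nf
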